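-- pv_equiv track=rewrite | github.com/JudgeZ/parser-lineage-analyzer | parser_lineage_analyzer/_analysis_state.py | _token_parent_prefixes
-- ===== SOURCE A (Python) =====
-- from collections.abc import Callable, Iterable, Iterator, Mapping, MutableMapping, Set as AbstractSet
--
-- def _token_parent_prefixes(token: str) -> Iterator[str]:
--     start = 0
--     while True:
--         dot = token.find(".", start)
--         if dot == -1:
--             return
--         yield token[:dot]
--         start = dot + 1
-- ===== SOURCE B (Python) =====
-- def _token_parent_prefixes(token: str):
--     acc = []
--     for ch in token:
--         if ch == ".":
--             yield "".join(acc)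
--         acc.append(ch)
-- ===== Notes on version B (the rewrite author's own statement) =====
-- stated objective: simpler
-- what changed: A repeatedly re-scans with str.find from a moving start and slices the token from index 0 at each dot; B makes a single pass over the characters with an accumulator list, yielding the joined accumulator whenever it meets a dot.
import Mathlib
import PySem

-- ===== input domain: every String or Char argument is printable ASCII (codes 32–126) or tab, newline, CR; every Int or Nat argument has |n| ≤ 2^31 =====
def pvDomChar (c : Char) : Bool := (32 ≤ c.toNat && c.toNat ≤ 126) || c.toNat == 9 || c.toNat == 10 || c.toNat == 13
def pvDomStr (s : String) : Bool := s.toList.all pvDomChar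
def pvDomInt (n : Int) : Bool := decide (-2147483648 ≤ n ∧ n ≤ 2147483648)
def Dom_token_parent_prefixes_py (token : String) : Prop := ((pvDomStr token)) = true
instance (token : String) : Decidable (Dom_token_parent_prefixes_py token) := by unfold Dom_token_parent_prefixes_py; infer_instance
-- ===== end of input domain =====

-- B replaces A's repeated str.find/slice scan by one pass over the characters with an
-- accumulator, yielding the joined accumulator at each dot (objective: simpler; not faster).

-- ===== PORT A =====
-- A's while-loop; the fuel argument only guards totality (find returns -1 once start
-- exceeds the length and start strictly increases, so fuel = len+1 is never exhausted).
def tokenParentPrefixesLoopA (token : String) : Nat → Int → List String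
  | 0, _ => []
  | fuel + 1, start =>
    let dot := PySem.Str.findFrom token "." start none
    if dot = -1 then []
    else PySem.Str.slice token none (some dot) :: tokenParentPrefixesLoopA token fuel (dot + 1)

def token_parent_prefixes_py (token : String) : List String :=
  tokenParentPrefixesLoopA token ((PySem.Str.len token).toNat + 1) 0

-- ===== PORT B =====
-- acc holds the characters seen so far ("acc.append(ch)"); "".join(acc) at each dot.
def tokenParentPrefixesGoB : List Char → List Char → List String
  | _, [] => []
  | acc, c :: rest =>
    if c = '.' then
      String.ofList (PySem.Chars.join [] (acc.map (fun ch => [ch]))) ::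
        tokenParentPrefixesGoB (acc ++ [c]) rest
    else tokenParentPrefixesGoB (acc ++ [c]) rest

def token_parent_prefixes_py_alt (token : String) : List String :=
  tokenParentPrefixesGoB [] token.toList

-- ===== PRECONDITION & SPEC =====
def Spec_token_parent_prefixes_py (token : String) (out : List String) : Prop := out = token_parent_prefixes_py_alt token
instance (token : String) (out : List String) : Decidable (Spec_token_parent_prefixes_py token out) := by unfold Spec_token_parent_prefixes_py; infer_instance

-- ===== CLAIM (what is proved, stated in full; the proofs are below) =====
def Claim_equal_token_parent_prefixes_py : Prop := ∀ (token : String), Dom_token_parent_prefixes_py token → Spec_token_parent_prefixes_py token (token_parent_prefixes_py token)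

-- ===== LEMMAS AND PROOFS =====

-- the common specification: the prefix (within ds) before each '.' of ds, in order
def pvPfx : List Char → List (List Char)
  | [] => []
  | c :: rest => (if c = '.' then [[]] else []) ++ (pvPfx rest).map (c :: ·)

-- B equals the spec
theorem pvGoB_eq (rest : List Char) : ∀ acc, tokenParentPrefixesGoB acc rest
    = (pvPfx rest).map (fun p => String.ofList (acc ++ p)) := by
  induction rest with
  | nil => intro acc; rfl
  | cons c rest ih =>
    intro acc
    by_cases hc : c = '.'
    · subst hc
      simp [tokenParentPrefixesGoB, pvPfx, ih, PySem.Chars.join_nil_singletons,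
        List.map_map, Function.comp_def]
    · simp [tokenParentPrefixesGoB, pvPfx, hc, ih, List.map_map, Function.comp_def]

-- find.go at any start offset, expressed through offset 0
theorem pvFindGoShift (sub : List Char) (t : List Char) : ∀ k : Nat,
    PySem.Chars.find.go sub t k
      = if PySem.Chars.find.go sub t 0 = -1 then -1
        else (k : Int) + PySem.Chars.find.go sub t 0 := by
  induction t with
  | nil =>
    intro k
    rw [PySem.Chars.find.go.eq_1, PySem.Chars.find.go.eq_1]
    by_cases he : sub.isEmpty = true
    · simp [he]
    · simp [he]
  | cons c t ih =>
    intro k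
    rw [PySem.Chars.find.go.eq_2, PySem.Chars.find.go.eq_2]
    have hge : -1 ≤ PySem.Chars.find.go sub t 0 := by
      have := PySem.Chars.neg_one_le_find t sub
      simpa [PySem.Chars.find] using this
    by_cases hp : sub.isPrefixOf (c :: t) = true
    · simp [hp]
    · rw [if_neg hp, if_neg hp]
      rw [ih (k + 1), ih 1]
      by_cases h0 : PySem.Chars.find.go sub t 0 = -1
      · simp [h0]
      · have h1 : ¬ ((1 : Int) + PySem.Chars.find.go sub t 0 = -1) := by omega
        simp only [h0, if_false]
        push_cast
        rw [if_neg h1]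
        ring

theorem pvFindCons (c : Char) (t : List Char) :
    PySem.Chars.find (c :: t) ['.']
      = if c = '.' then 0
        else if PySem.Chars.find t ['.'] = -1 then -1 else 1 + PySem.Chars.find t ['.'] := by
  show PySem.Chars.find.go ['.'] (c :: t) 0 = _
  rw [PySem.Chars.find.go.eq_2]
  have hpre : (['.'].isPrefixOf (c :: t)) = (c == '.') := by
    simp [List.isPrefixOf, Eq.comm]
  by_cases hc : c = '.'
  · simp [hc]
  · simp only [hpre, hc, beq_iff_eq, if_false]
    rw [pvFindGoShift ['.'] t 1]
    rfl

-- no dot ⇒ no prefixes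
theorem pvPfx_of_find_neg (ds : List Char) (h : PySem.Chars.find ds ['.'] = -1) :
    pvPfx ds = [] := by
  induction ds with
  | nil => rfl
  | cons c t ih =>
    rw [pvFindCons] at h
    by_cases hc : c = '.'
    · simp [hc] at h
    · simp only [hc, if_false] at h
      have hfind : PySem.Chars.find t ['.'] = -1 := by
        by_cases h' : PySem.Chars.find t ['.'] = -1
        · exact h'
        · simp only [h', if_false] at h
          have := PySem.Chars.neg_one_le_find t ['.']
          omega
      simp [pvPfx, hc, ih hfind]

-- first dot at d ⇒ pvPfx splits there
theorem pvPfx_split (ds : List Char) : ∀ d : Nat,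
    PySem.Chars.find ds ['.'] = (d : Int) →
    pvPfx ds = ds.take d ::
      (pvPfx (ds.drop (d + 1))).map (fun p => ds.take d ++ '.' :: p) := by
  induction ds with
  | nil =>
    intro d h
    rw [show PySem.Chars.find [] ['.'] = -1 by rfl] at h
    omega
  | cons c t ih =>
    intro d h
    rw [pvFindCons] at h
    by_cases hc : c = '.'
    · rw [if_pos hc] at h
      have hd : d = 0 := by omega
      subst hd
      simp [pvPfx, hc]
    · rw [if_neg hc] at h
      by_cases h' : PySem.Chars.find t ['.'] = -1
      · rw [if_pos h'] at h; omega
      · rw [if_neg h'] at h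
        have hge := PySem.Chars.neg_one_le_find t ['.']
        obtain ⟨d', rfl⟩ : ∃ d', d = d' + 1 := ⟨d - 1, by omega⟩
        have ht : PySem.Chars.find t ['.'] = (d' : Int) := by push_cast at h ⊢; omega
        simp [pvPfx, hc, ih d' ht, List.map_map, Function.comp_def]

-- start past the end ⇒ find returns -1 (CPython rule, direct from the definition)
theorem pvFindFromPast (cs sub : List Char) (st : Int) (h : (cs.length : Int) < st) :
    PySem.Chars.findFrom cs sub st none = -1 := by
  unfold PySem.Chars.findFrom
  have hst : ¬ (st < 0) := by omega
  simp [hst, h]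

-- A's loop equals the spec, mapped over the already-consumed prefix
theorem pvLoopA_eq (token : String) : ∀ fuel : Nat, ∀ start : Nat,
    token.toList.length + 1 - start ≤ fuel →
    tokenParentPrefixesLoopA token fuel (start : Int)
      = (pvPfx (token.toList.drop start)).map
          (fun p => String.ofList (token.toList.take start ++ p)) := by
  intro fuel
  induction fuel with
  | zero =>
    intro start hf
    rw [tokenParentPrefixesLoopA]
    have hdrop : token.toList.drop start = [] := List.drop_eq_nil_of_le (by omega)
    simp [hdrop, pvPfx]
  | succ fuel ih =>
    intro start hf
    rw [tokenParentPrefixesLoopA]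
    simp only [PySem.Str.findFrom_eq]
    have hdots : ("." : String).toList = ['.'] := by decide
    by_cases hs : start ≤ token.toList.length
    · rw [hdots, PySem.Chars.findFrom_natCast token.toList ['.'] start hs]
      by_cases hfind : PySem.Chars.find (token.toList.drop start) ['.'] = -1
      · simp [hfind, pvPfx_of_find_neg _ hfind]
      · have hge := PySem.Chars.neg_one_le_find (token.toList.drop start) ['.']
        have hle := PySem.Chars.find_le_length (token.toList.drop start) ['.']
        obtain ⟨d, hd⟩ : ∃ d : Nat, PySem.Chars.find (token.toList.drop start) ['.'] = (d : Int) :=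
          ⟨(PySem.Chars.find (token.toList.drop start) ['.']).toNat, by omega⟩
        have hdlen : (d : Int) ≤ ((token.toList.drop start).length : Int) := hd ▸ hle
        have hdlen' : d ≤ token.toList.length - start := by
          rw [List.length_drop] at hdlen; exact_mod_cast hdlen
        have hd' : ¬ ((d : Int) = -1) := by omega
        have hne : ¬ ((start : Int) + (d : Int) = -1) := by omega
        rw [hd, if_neg hd', if_neg hne]
        have hcast : (start : Int) + (d : Int) + 1 = ((start + d + 1 : Nat) : Int) := by push_cast; ring
        rw [hcast, ih (start + d + 1) (by omega)]
        -- the first dot of the dropped list sits at position d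
        have h0 : (0 : Int) ≤ PySem.Chars.find (token.toList.drop start) ['.'] := by omega
        have hpre := (PySem.Chars.find_spec h0).1
        rw [hd] at hpre
        simp only [Int.toNat_natCast] at hpre
        obtain ⟨tl, htl⟩ := hpre
        have hd0 : (token.toList.drop start)[d]? = some '.' := by
          have := congrArg (fun l => l[0]?) htl.symm
          simpa [List.getElem?_drop] using this
        have hdot : (token.toList.drop start).take (d + 1)
            = (token.toList.drop start).take d ++ ['.'] := by
          rw [List.take_add_one, hd0]; rfl
        -- the slice is the take
        have hslice : PySem.Str.slice token none (some ((start : Int) + (d : Int)))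
            = String.ofList (token.toList.take (start + d)) := by
          apply String.toList_inj.mp
          have hsd : ((start : Int) + (d : Int)) = ((start + d : Nat) : Int) := by push_cast; ring
          rw [PySem.Str.toList_slice, hsd]
          show PySem.List.slice _ _ _ = _
          rw [PySem.List.slice_to _ (by positivity : (0:Int) ≤ ((start + d : Nat) : Int))]
          simp
          omega
        rw [pvPfx_split (token.toList.drop start) d hd]
        simp only [List.map_cons, List.map_map, Function.comp_def]
        congr 1
        · rw [hslice]
          congr 1
          rw [List.take_add]
        · rw [show List.drop (d + 1) (List.drop start token.toList)
              = List.drop (start + d + 1) token.toList by rw [List.drop_drop]; congr 1]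
          apply List.map_congr_left
          intro p _
          have h1 : token.toList.take (start + d + 1)
              = token.toList.take start ++ (token.toList.drop start).take (d + 1) := by
            rw [Nat.add_assoc, ← List.take_add]
          rw [h1, hdot]
          simp [List.append_assoc]
    · -- start past the end: findFrom returns -1 by its definition
      have hneg : PySem.Chars.findFrom token.toList ['.'] (start : Int) none = -1 :=
        pvFindFromPast _ _ _ (by exact_mod_cast (by omega : (token.toList.length : Int) < (start : Int)))
      rw [hdots, hneg]
      have hdrop : token.toList.drop start = [] := List.drop_eq_nil_of_le (by omega)
      simp [hdrop, pvPfx]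

-- ===== VERDICT (by name: the statement is the Claim_ definition above) =====
theorem token_parent_prefixes_py_spec : Claim_equal_token_parent_prefixes_py := by
  intro token _
  unfold Spec_token_parent_prefixes_py token_parent_prefixes_py token_parent_prefixes_py_alt
  have hlen : (PySem.Str.len token).toNat = token.toList.length := by
    simp [PySem.Str.len]
  rw [show (0 : Int) = ((0 : Nat) : Int) from rfl,
    pvLoopA_eq token ((PySem.Str.len token).toNat + 1) 0 (by omega),
    pvGoB_eq token.toList []]
  simp
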